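-- pv_equiv track=rewrite | github.com/marcellszi/rna3db | rna3db/utils.py | to_case_sensitive
-- ===== SOURCE A (Python) =====
-- def to_case_sensitive(s: str) -> str:
--     out = []
--     for i, part in enumerate(s.split("-")):
--         if i % 2 == 0:
--             out.append(part.upper())
--         else:
--             out.append(part.lower())
--     return "".join(out)
-- ===== SOURCE B (Python) =====
-- def to_case_sensitive(s: str) -> str:
--     out = []
--     dashes = 0
--     for c in s:
--         if c == "-":
--             dashes += 1
--         else:
--             out.append(c.upper() if dashes % 2 == 0 else c.lower())
--     return "".join(out)
-- ===== Notes on version B (the rewrite author's own statement) =====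
-- stated objective: simpler
-- what changed: Replaced the split-on-dash / enumerate / per-part casing / join pipeline with a single character-level pass that counts dashes and cases each non-dash character by the current dash-count parity.
import Mathlib
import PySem

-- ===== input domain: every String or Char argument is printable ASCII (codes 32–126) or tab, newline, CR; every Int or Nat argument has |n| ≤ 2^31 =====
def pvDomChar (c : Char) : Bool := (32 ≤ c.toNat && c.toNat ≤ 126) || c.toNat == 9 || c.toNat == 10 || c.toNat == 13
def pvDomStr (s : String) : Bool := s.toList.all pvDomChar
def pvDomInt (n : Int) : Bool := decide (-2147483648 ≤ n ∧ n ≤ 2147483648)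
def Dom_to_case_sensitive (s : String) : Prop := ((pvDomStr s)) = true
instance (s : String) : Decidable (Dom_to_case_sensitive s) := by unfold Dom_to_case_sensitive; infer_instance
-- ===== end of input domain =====

-- B replaces split/enumerate/join by one character pass with a dash-parity counter (objective: simpler decomposition, same cost).

-- ===== PORT A =====
-- A: split on "-", alternate part.upper()/part.lower() by index parity, join.
def to_case_sensitive (s : String) : String :=
  String.mk (PySem.Chars.join []
    ((PySem.List.enumerate (PySem.Chars.splitOn s.toList ['-']) 0).foldl
      (fun out p =>
        if PySem.Int.mod p.1 2 = 0 then out ++ [PySem.Chars.upper p.2]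
        else out ++ [PySem.Chars.lower p.2]) []))

-- ===== PORT B =====
-- B: one pass, counting dashes; non-dash chars are cased by the current parity.
def to_case_sensitive_alt (s : String) : String :=
  String.mk
    (s.toList.foldl
      (fun (st : Int × List Char) c =>
        if c = '-' then (st.1 + 1, st.2)
        else (st.1, st.2 ++ [if PySem.Int.mod st.1 2 = 0 then PySem.Chars.upperChar c
                             else PySem.Chars.lowerChar c]))
      (0, ([] : List Char))).2

-- ===== PRECONDITION & SPEC =====
def Spec_to_case_sensitive (s : String) (out : String) : Prop := out = to_case_sensitive_alt s
instance (s : String) (out : String) : Decidable (Spec_to_case_sensitive s out) := by unfold Spec_to_case_sensitive; infer_instance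

-- ===== CLAIM (what is proved, stated in full; the proofs are below) =====
def Claim_equal_to_case_sensitive : Prop := ∀ (s : String), Dom_to_case_sensitive s → Spec_to_case_sensitive s (to_case_sensitive s)

-- ===== LEMMAS AND PROOFS =====

-- reference recursion both ports are reduced to: pvAlt p cs = remaining output with p dashes already seen
def pvAlt (p : Int) : List Char → List Char
  | [] => []
  | c :: cs =>
    if c = '-' then pvAlt (p + 1) cs
    else (if PySem.Int.mod p 2 = 0 then PySem.Chars.upperChar c else PySem.Chars.lowerChar c) :: pvAlt p cs

-- reference form of s.split("-")
def pvParts : List Char → List (List Char)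
  | [] => [[]]
  | c :: cs => if c = '-' then [] :: pvParts cs else (pvParts cs).modifyHead (c :: ·)

def pvCased (p : Int × List Char) : List Char :=
  if PySem.Int.mod p.1 2 = 0 then PySem.Chars.upper p.2 else PySem.Chars.lower p.2

lemma pvParts_ne_nil (cs : List Char) : pvParts cs ≠ [] := by
  induction cs with
  | nil => simp [pvParts]
  | cons c t ih =>
    obtain ⟨hh, tt, hp⟩ := List.exists_cons_of_ne_nil ih
    simp only [pvParts, hp]
    split <;> simp

lemma pvFlatten_intersperse_nil (ps : List (List Char)) :
    (List.intersperse ([] : List Char) ps).flatten = ps.flatten := by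
  match ps with
  | [] => rfl
  | [a] => rfl
  | a :: b :: t =>
    simp [List.intersperse, pvFlatten_intersperse_nil (b :: t)]

lemma pvGo_eq (fuel : Nat) : ∀ (l cur acc : _), l.length < fuel →
    PySem.Chars.splitOn.go ['-'] fuel l cur acc
      = acc.reverse ++ (pvParts l).modifyHead (cur.reverse ++ ·) := by
  induction fuel with
  | zero => intro l cur acc h; omega
  | succ n ih =>
    intro l cur acc h
    match l with
    | [] => simp [PySem.Chars.splitOn.go, pvParts]
    | c :: rest =>
      by_cases hc : c = '-'
      · subst hc
        have : PySem.Chars.splitOn.go ['-'] (n+1) ('-'::rest) cur acc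
            = PySem.Chars.splitOn.go ['-'] n rest [] (cur.reverse :: acc) := by
          simp [PySem.Chars.splitOn.go, List.isPrefixOf]
        rw [this, ih rest [] (cur.reverse :: acc) (by simpa using Nat.lt_of_succ_lt_succ h)]
        obtain ⟨hh, tt, hps⟩ := List.exists_cons_of_ne_nil (pvParts_ne_nil rest)
        simp [pvParts, hps]
      · have : PySem.Chars.splitOn.go ['-'] (n+1) (c::rest) cur acc
            = PySem.Chars.splitOn.go ['-'] n rest (c :: cur) acc := by
          simp [PySem.Chars.splitOn.go, List.isPrefixOf, Ne.symm hc]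
        rw [this, ih rest (c :: cur) acc (by simpa using Nat.lt_of_succ_lt_succ h)]
        obtain ⟨hh, tt, hps⟩ := List.exists_cons_of_ne_nil (pvParts_ne_nil rest)
        simp [pvParts, hc, hps]

lemma pvSplitOn_eq (l : List Char) : PySem.Chars.splitOn l ['-'] = pvParts l := by
  unfold PySem.Chars.splitOn
  rw [pvGo_eq (l.length + 1) l [] [] (by omega)]
  obtain ⟨hh, tt, hps⟩ := List.exists_cons_of_ne_nil (pvParts_ne_nil l)
  simp [hps]

lemma pvA_eq_alt (cs : List Char) : ∀ (p : Int),
    ((PySem.List.enumerate (pvParts cs) p).map pvCased).flatten = pvAlt p cs := by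
  induction cs with
  | nil => intro p; simp [pvParts, pvAlt, PySem.List.enumerate, pvCased]; split <;> simp [PySem.Chars.upper, PySem.Chars.lower]
  | cons c cs ih =>
    intro p
    by_cases hc : c = '-'
    · subst hc
      have hnil : pvCased (p, []) = [] := by
        unfold pvCased; split <;> rfl
      have h1 : pvParts ('-' :: cs) = [] :: pvParts cs := by simp [pvParts]
      have h2 : pvAlt p ('-' :: cs) = pvAlt (p + 1) cs := by simp [pvAlt]
      rw [h1, h2, PySem.List.enumerate_cons, List.map_cons, List.flatten_cons, hnil,
        List.nil_append, ih (p + 1)]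
    · obtain ⟨hh, tt, hps⟩ := List.exists_cons_of_ne_nil (pvParts_ne_nil cs)
      have hihp := ih p
      rw [hps] at hihp
      simp only [PySem.List.enumerate_cons, List.map_cons, List.flatten_cons] at hihp
      simp only [pvParts, if_neg hc, hps, List.modifyHead_cons, PySem.List.enumerate_cons,
        List.map_cons, List.flatten_cons]
      simp only [pvAlt, if_neg hc]
      by_cases hp : PySem.Int.mod p 2 = 0
      · simp only [pvCased, if_pos hp, PySem.Chars.upper, List.map_cons, List.cons_append] at hihp ⊢
        rw [hihp]
      · simp only [pvCased, if_neg hp, PySem.Chars.lower, List.map_cons, List.cons_append] at hihp ⊢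
        rw [hihp]

lemma pvB_inv (cs : List Char) : ∀ (p : Int) (acc : List Char),
    (cs.foldl
      (fun (st : Int × List Char) c =>
        if c = '-' then (st.1 + 1, st.2)
        else (st.1, st.2 ++ [if PySem.Int.mod st.1 2 = 0 then PySem.Chars.upperChar c
                             else PySem.Chars.lowerChar c]))
      (p, acc)).2 = acc ++ pvAlt p cs := by
  induction cs with
  | nil => intro p acc; simp [pvAlt]
  | cons c cs ih =>
    intro p acc
    simp only [List.foldl_cons]
    by_cases hc : c = '-'
    · subst hc
      rw [if_pos rfl, ih]
      simp [pvAlt]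
    · rw [if_neg hc, ih]
      simp [pvAlt, hc]

-- ===== VERDICT (by name: the statement is the Claim_ definition above) =====
theorem to_case_sensitive_spec : Claim_equal_to_case_sensitive := by
  intro s _
  show to_case_sensitive s = to_case_sensitive_alt s
  unfold to_case_sensitive to_case_sensitive_alt
  have hfun : (fun (out : List (List Char)) (p : Int × List Char) =>
        if PySem.Int.mod p.1 2 = 0 then out ++ [PySem.Chars.upper p.2]
        else out ++ [PySem.Chars.lower p.2])
      = fun out p => out ++ [pvCased p] := by
    funext out p; unfold pvCased; split <;> rfl
  rw [hfun, PySem.List.foldl_append_singleton_eq_map, pvSplitOn_eq, pvB_inv]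
  simp only [PySem.Chars.join, List.intercalate, pvFlatten_intersperse_nil, List.nil_append]
  rw [pvA_eq_alt]
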